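-- pv_equiv track=rewrite | github.com/itszrong/Civilian-Evacuation-Simulation-UK | backend/services/orchestration/multi_city_orchestrator_old.py | _sanitize_city_name
-- ===== SOURCE A (Python) =====
-- def _sanitize_city_name(city: str) -> str:
--     """Clean up city name by removing common suffixes like ', UK', ', England', etc."""
--     city_lower = city.lower().strip()
--
--     # Remove common suffixes
--     suffixes_to_remove = [', uk', ', england', ', scotland', ', wales', ', northern ireland']
--     for suffix in suffixes_to_remove:
--         if city_lower.endswith(suffix):
--             city_lower = city_lower[:-len(suffix)].strip()
--             break
--
--     return city_lower
-- ===== SOURCE B (Python) =====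
-- _COUNTRY_TAILS = {'uk', 'england', 'scotland', 'wales', 'northern ireland'}
--
--
-- def _sanitize_city_name(city: str) -> str:
--     """Clean up city name by removing common suffixes like ', UK', ', England', etc."""
--     city_lower = city.lower().strip()
--     idx = city_lower.rfind(', ')
--     if idx != -1 and city_lower[idx + 2:] in _COUNTRY_TAILS:
--         return city_lower[:idx].strip()
--     return city_lower
-- ===== Notes on version B (the rewrite author's own statement) =====
-- stated objective: idiomatic
-- what changed: B replaces A's ordered scan over the five country suffixes with endswith and per-suffix slicing by a single rfind of the comma-space separator plus one set-membership test of the tail.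
import Mathlib
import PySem

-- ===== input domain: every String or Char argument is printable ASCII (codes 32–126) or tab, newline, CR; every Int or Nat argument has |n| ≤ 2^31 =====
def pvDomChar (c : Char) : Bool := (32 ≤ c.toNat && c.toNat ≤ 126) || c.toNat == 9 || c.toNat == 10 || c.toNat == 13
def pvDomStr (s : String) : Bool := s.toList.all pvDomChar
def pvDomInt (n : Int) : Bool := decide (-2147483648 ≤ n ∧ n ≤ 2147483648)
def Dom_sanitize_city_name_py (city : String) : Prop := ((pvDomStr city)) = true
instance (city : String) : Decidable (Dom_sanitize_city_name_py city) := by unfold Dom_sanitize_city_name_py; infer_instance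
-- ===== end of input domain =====

-- B strips the country suffix with one rfind of the comma-space separator and a single
-- set-membership test of the tail instead of A's ordered endswith-scan over the five
-- suffixes (objective: idiomatic).

-- ===== PORT A =====
-- A's list of the five lowercased country suffixes, each a comma-space plus a country name
def pvSuffixes : List (List Char) :=
  [[',', ' ', 'u', 'k'],
   [',', ' ', 'e', 'n', 'g', 'l', 'a', 'n', 'd'],
   [',', ' ', 's', 'c', 'o', 't', 'l', 'a', 'n', 'd'],
   [',', ' ', 'w', 'a', 'l', 'e', 's'],
   [',', ' ', 'n', 'o', 'r', 't', 'h', 'e', 'r', 'n', ' ', 'i', 'r', 'e', 'l', 'a', 'n', 'd']]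

-- A's for-loop with break: try each suffix in order; on the first match, cut, strip, stop.
def pvLoopA (cl : List Char) : List (List Char) → List Char
  | [] => cl
  | sfx :: rest =>
    if PySem.Chars.endswith cl sfx then
      PySem.Chars.strip (PySem.Chars.slice cl none (some (-(sfx.length : Int))))
    else pvLoopA cl rest

def sanitize_city_name_py (city : String) : String :=
  String.ofList (pvLoopA (PySem.Chars.strip (PySem.Chars.lower city.toList)) pvSuffixes)

-- ===== PORT B =====
-- the set _COUNTRY_TAILS of the five country names
def pvTails : List (List Char) :=
  [['u', 'k'],
   ['e', 'n', 'g', 'l', 'a', 'n', 'd'],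
   ['s', 'c', 'o', 't', 'l', 'a', 'n', 'd'],
   ['w', 'a', 'l', 'e', 's'],
   ['n', 'o', 'r', 't', 'h', 'e', 'r', 'n', ' ', 'i', 'r', 'e', 'l', 'a', 'n', 'd']]

def sanitize_city_name_py_alt (city : String) : String :=
  let cl := PySem.Chars.strip (PySem.Chars.lower city.toList)
  let idx := PySem.Chars.rfind cl [',', ' ']
  if idx ≠ -1 ∧ PySem.Chars.slice cl (some (idx + 2)) none ∈ pvTails then
    String.ofList (PySem.Chars.strip (PySem.Chars.slice cl none (some idx)))
  else
    String.ofList cl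

-- ===== PRECONDITION & SPEC =====
def Spec_sanitize_city_name_py (city : String) (out : String) : Prop := out = sanitize_city_name_py_alt city
instance (city : String) (out : String) : Decidable (Spec_sanitize_city_name_py city out) := by unfold Spec_sanitize_city_name_py; infer_instance

-- ===== CLAIM (what is proved, stated in full; the proofs are below) =====
def Claim_equal_sanitize_city_name_py : Prop := ∀ (city : String), Dom_sanitize_city_name_py city → Spec_sanitize_city_name_py city (sanitize_city_name_py city)

-- ===== LEMMAS AND PROOFS =====

-- B's conditional on the character-list level (proof-only restatement of B's body).
def pvAltCore (cl : List Char) : List Char :=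
  if PySem.Chars.rfind cl [',', ' '] ≠ -1 ∧
      PySem.Chars.slice cl (some (PySem.Chars.rfind cl [',', ' '] + 2)) none ∈ pvTails then
    PySem.Chars.strip (PySem.Chars.slice cl none (some (PySem.Chars.rfind cl [',', ' '])))
  else cl

theorem pv_alt_eq (city : String) :
    sanitize_city_name_py_alt city =
      String.ofList (pvAltCore (PySem.Chars.strip (PySem.Chars.lower city.toList))) := by
  unfold sanitize_city_name_py_alt pvAltCore
  split <;> simp_all

-- rfind.go returns p when sub occurs at p and nowhere later.
theorem pv_go_eq_of_max (s sub : List Char) (j p : Nat) (hp : p ≤ j)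
    (hpre : sub.isPrefixOf (s.drop p) = true)
    (hmax : ∀ k, p < k → sub.isPrefixOf (s.drop k) = false) :
    PySem.Chars.rfind.go s sub j = (p : Int) := by
  induction j with
  | zero =>
    interval_cases p
    simp [PySem.Chars.rfind.go] at hpre ⊢
    simp [hpre]
  | succ j ih =>
    by_cases hpj : p = j + 1
    · subst hpj
      simp [PySem.Chars.rfind.go, hpre]
    · have hlt : p ≤ j := by omega
      have hfalse := hmax (j + 1) (by omega)
      simp [PySem.Chars.rfind.go, hfalse]
      exact ih hlt

-- rfind.go is -1 or a valid occurrence index.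
theorem pv_go_cases (s sub : List Char) (j : Nat) :
    PySem.Chars.rfind.go s sub j = -1 ∨
      ∃ i : Nat, PySem.Chars.rfind.go s sub j = (i : Int) ∧
        sub.isPrefixOf (s.drop i) = true := by
  induction j with
  | zero =>
    by_cases h : sub.isPrefixOf s
    · right; exact ⟨0, by simp [PySem.Chars.rfind.go, h], by simpa using h⟩
    · left; simp [PySem.Chars.rfind.go, h]
  | succ j ih =>
    by_cases h : sub.isPrefixOf (s.drop (j + 1))
    · right; exact ⟨j + 1, by simp [PySem.Chars.rfind.go, h], h⟩
    · simpa [PySem.Chars.rfind.go, h] using ih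

-- when the string ends in comma-space ++ t with a comma-free t, rfind finds exactly that separator
theorem pv_rfind_eq (u t : List Char) (hc : ',' ∉ t) :
    PySem.Chars.rfind (u ++ ',' :: ' ' :: t) [',', ' '] = (u.length : Int) := by
  unfold PySem.Chars.rfind
  apply pv_go_eq_of_max
  · simp
  · simp [List.isPrefixOf]
  · intro k hk
    rw [List.drop_append, List.drop_of_length_le (by omega), List.nil_append]
    rcases Nat.exists_eq_add_of_lt hk with ⟨m, hm⟩
    subst hm
    rcases m with _ | m
    · simp [List.isPrefixOf]
    · have : (u.length + (m + 1) + 1) - u.length = m + 2 := by omega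
      rw [this]
      by_contra hfalse
      have hpref : [',', ' '] <+: (List.drop (m + 2) (',' :: ' ' :: t)) := by
        rw [← List.isPrefixOf_iff_prefix]
        simpa using hfalse
      have : (',' : Char) ∈ List.drop (m + 2) (',' :: ' ' :: t) :=
        hpref.subset (by simp)
      have : (',' : Char) ∈ t := by
        have := List.mem_of_mem_drop (by simpa using this)
        simpa using this
      exact hc this

theorem pv_tail_eq (u t : List Char) :
    PySem.List.slice (u ++ ',' :: ' ' :: t) (some ((u.length : Int) + 2)) none = t := by
  have h2 : ((u.length : Int) + 2) = ((u.length + 2 : Nat) : Int) := by push_cast; ring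
  rw [h2, PySem.List.slice_from_natCast]
  have : u ++ ',' :: ' ' :: t = (u ++ [',', ' ']) ++ t := by simp
  rw [this, List.drop_left' (by simp)]

theorem pv_head_eq (u t : List Char) :
    PySem.List.slice (u ++ ',' :: ' ' :: t) none (some (u.length : Int)) = u := by
  rw [PySem.List.slice_to_natCast, List.take_left]

-- A's negative-index cut equals the part before the matched suffix
theorem pv_cut_eq (u t : List Char) :
    PySem.List.slice (u ++ ',' :: ' ' :: t) none (some (-(((',' :: ' ' :: t : List Char).length : Nat) : Int))) = u := by
  rw [PySem.List.slice_to_neg_natCast _ _ (by simp)]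
  have : (u ++ ',' :: ' ' :: t).length - (',' :: ' ' :: t).length = u.length := by
    simp
  rw [this, List.take_left]

-- match case: if cl ends with ', ' ++ t for a tail t of the set, B cuts exactly A's cut
theorem pv_match_case (cl t : List Char) (hc : ',' ∉ t) (ht : t ∈ pvTails)
    (h : PySem.Chars.endswith cl (',' :: ' ' :: t) = true) :
    pvAltCore cl = PySem.Chars.strip (PySem.Chars.slice cl none (some (-(((',' :: ' ' :: t : List Char).length : Int))))) := by
  rw [PySem.Chars.endswith_iff] at h
  obtain ⟨u, hu⟩ := h
  subst hu
  unfold pvAltCore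
  rw [if_pos]
  · rw [pv_rfind_eq u t hc]
    simp only [PySem.Chars.slice_eq_listSlice]
    rw [pv_head_eq]
    have hlen : (((',' :: ' ' :: t : List Char).length : Int)) = (((',' :: ' ' :: t : List Char).length : Nat) : Int) := by simp
    rw [hlen, pv_cut_eq]
  · constructor
    · rw [pv_rfind_eq u t hc]; omega
    · rw [pv_rfind_eq u t hc]
      simp only [PySem.Chars.slice_eq_listSlice]
      rw [pv_tail_eq]
      exact ht

-- no-match case: if cl ends with none of the five suffixes, B's condition is false
theorem pv_nomatch_case (cl : List Char)
    (h : ∀ t ∈ pvTails, PySem.Chars.endswith cl (',' :: ' ' :: t) = false) :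
    pvAltCore cl = cl := by
  unfold pvAltCore
  rw [if_neg]
  rintro ⟨hne, hmem⟩
  rcases pv_go_cases cl [',', ' '] cl.length with hneg | ⟨i, hi, hpre⟩
  · exact hne hneg
  · rw [show PySem.Chars.rfind cl [',', ' '] = PySem.Chars.rfind.go cl [',', ' '] cl.length from rfl, hi] at hne hmem
    rw [List.isPrefixOf_iff_prefix] at hpre
    obtain ⟨r, hr⟩ := hpre
    have hr' : cl.drop i = ',' :: ' ' :: r := by rw [← hr]; rfl
    have htail : PySem.List.slice cl (some ((i : Int) + 2)) none = r := by
      have h2 : ((i : Int) + 2) = ((i + 2 : Nat) : Int) := by push_cast; ring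
      rw [h2, PySem.List.slice_from_natCast]
      have : cl.drop (i + 2) = (cl.drop i).drop 2 := by
        rw [List.drop_drop, Nat.add_comm]
      rw [this, hr']
      simp
    simp only [PySem.Chars.slice_eq_listSlice] at hmem
    rw [htail] at hmem
    have hsfx : PySem.Chars.endswith cl (',' :: ' ' :: r) = true := by
      rw [PySem.Chars.endswith_iff]
      exact ⟨cl.take i, by rw [← hr']; simp⟩
    have := h r hmem
    rw [this] at hsfx
    exact absurd hsfx (by simp)

-- the loop over the five suffixes equals B's single test
theorem pv_core (cl : List Char) : pvLoopA cl pvSuffixes = pvAltCore cl := by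
  by_cases h1 : PySem.Chars.endswith cl [',', ' ', 'u', 'k'] = true
  · rw [show pvLoopA cl pvSuffixes = PySem.Chars.strip (PySem.Chars.slice cl none (some (-(([',', ' ', 'u', 'k'] : List Char).length : Int)))) by
      simp [pvSuffixes, pvLoopA, h1]]
    exact (pv_match_case cl ['u', 'k'] (by decide) (by simp [pvTails]) h1).symm
  all_goals by_cases h2 : PySem.Chars.endswith cl [',', ' ', 'e', 'n', 'g', 'l', 'a', 'n', 'd'] = true
  · rw [show pvLoopA cl pvSuffixes = PySem.Chars.strip (PySem.Chars.slice cl none (some (-(([',', ' ', 'e', 'n', 'g', 'l', 'a', 'n', 'd'] : List Char).length : Int)))) by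
      simp [pvSuffixes, pvLoopA, h1, h2]]
    exact (pv_match_case cl ['e', 'n', 'g', 'l', 'a', 'n', 'd'] (by decide) (by simp [pvTails]) h2).symm
  all_goals by_cases h3 : PySem.Chars.endswith cl [',', ' ', 's', 'c', 'o', 't', 'l', 'a', 'n', 'd'] = true
  · rw [show pvLoopA cl pvSuffixes = PySem.Chars.strip (PySem.Chars.slice cl none (some (-(([',', ' ', 's', 'c', 'o', 't', 'l', 'a', 'n', 'd'] : List Char).length : Int)))) by
      simp [pvSuffixes, pvLoopA, h1, h2, h3]]
    exact (pv_match_case cl ['s', 'c', 'o', 't', 'l', 'a', 'n', 'd'] (by decide) (by simp [pvTails]) h3).symm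
  all_goals by_cases h4 : PySem.Chars.endswith cl [',', ' ', 'w', 'a', 'l', 'e', 's'] = true
  · rw [show pvLoopA cl pvSuffixes = PySem.Chars.strip (PySem.Chars.slice cl none (some (-(([',', ' ', 'w', 'a', 'l', 'e', 's'] : List Char).length : Int)))) by
      simp [pvSuffixes, pvLoopA, h1, h2, h3, h4]]
    exact (pv_match_case cl ['w', 'a', 'l', 'e', 's'] (by decide) (by simp [pvTails]) h4).symm
  all_goals by_cases h5 : PySem.Chars.endswith cl [',', ' ', 'n', 'o', 'r', 't', 'h', 'e', 'r', 'n', ' ', 'i', 'r', 'e', 'l', 'a', 'n', 'd'] = true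
  · rw [show pvLoopA cl pvSuffixes = PySem.Chars.strip (PySem.Chars.slice cl none (some (-(([',', ' ', 'n', 'o', 'r', 't', 'h', 'e', 'r', 'n', ' ', 'i', 'r', 'e', 'l', 'a', 'n', 'd'] : List Char).length : Int)))) by
      simp [pvSuffixes, pvLoopA, h1, h2, h3, h4, h5]]
    exact (pv_match_case cl ['n', 'o', 'r', 't', 'h', 'e', 'r', 'n', ' ', 'i', 'r', 'e', 'l', 'a', 'n', 'd'] (by decide) (by simp [pvTails]) h5).symm
  · rw [show pvLoopA cl pvSuffixes = cl by simp [pvSuffixes, pvLoopA, h1, h2, h3, h4, h5]]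
    refine (pv_nomatch_case cl ?_).symm
    intro t ht
    simp only [pvTails, List.mem_cons, List.not_mem_nil, or_false] at ht
    rcases ht with rfl | rfl | rfl | rfl | rfl
    · simpa using h1
    · simpa using h2
    · simpa using h3
    · simpa using h4
    · simpa using h5

-- ===== VERDICT (by name: the statement is the Claim_ definition above) =====
theorem sanitize_city_name_py_spec : Claim_equal_sanitize_city_name_py := by
  intro city _
  unfold Spec_sanitize_city_name_py
  rw [pv_alt_eq]
  unfold sanitize_city_name_py
  rw [pv_core]
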